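-- pv_equiv track=rewrite | github.com/thomasjball/PyExZ3 | test/polyspace.py | where_are_the_errors
-- ===== SOURCE A (Python) =====
-- def where_are_the_errors(input):
-- 	k = input // 100
-- 	x = 2
-- 	y = k + 5
-- 	while x < 10:
-- 		x = x + 1
-- 		y = y + 3
-- 	if (3*k + 100) > 43:
-- 		y = y + 1
-- 		# x == 10, y == k+30
-- 		if x - y == 0:
-- 			# unreachable
-- 			return "DIVZERO"
-- 		x = x // (x - y)
-- 	return x
-- ===== SOURCE B (Python) =====
-- def where_are_the_errors(input):
--     # closed form: the fixed loop always ends with x=10, y=k+29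
--     k = input // 100
--     if 3 * k + 100 > 43:
--         return 10 // (-20 - k)
--     return 10
-- ===== Notes on version B (the rewrite author's own statement) =====
-- stated objective: simpler
-- what changed: Replaces the fixed while loop and the unreachable DIVZERO branch with the loop's closed form: a single guarded floor-division on k = input floor-divided by the constant.
import Mathlib
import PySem

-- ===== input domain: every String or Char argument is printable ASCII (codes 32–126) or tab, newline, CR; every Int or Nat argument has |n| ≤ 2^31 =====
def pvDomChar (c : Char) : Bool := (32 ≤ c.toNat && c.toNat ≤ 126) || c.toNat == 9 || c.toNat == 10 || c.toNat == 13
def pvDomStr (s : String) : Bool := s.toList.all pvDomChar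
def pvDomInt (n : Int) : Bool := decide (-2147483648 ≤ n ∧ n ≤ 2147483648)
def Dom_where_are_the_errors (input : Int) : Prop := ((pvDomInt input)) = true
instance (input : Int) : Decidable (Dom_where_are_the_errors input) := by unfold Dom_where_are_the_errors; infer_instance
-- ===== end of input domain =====

-- B replaces the fixed 8-iteration loop (and the unreachable DIVZERO branch) with its closed form; objective: simpler.


-- ===== PORT A =====
-- the while loop of A, step for step; terminates since 10 - x decreases
def pvLoopA (x y : Int) : Int × Int :=
  if _h : x < 10 then pvLoopA (x + 1) (y + 3) else (x, y)
termination_by (10 - x).toNat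
decreasing_by omega

def where_are_the_errors (input : Int) : Int :=
  let k := PySem.Int.floordiv input 100
  let x : Int := 2
  let y := k + 5
  let (x, y) := pvLoopA x y
  if 3 * k + 100 > 43 then
    let y := y + 1
    if x - y = 0 then
      0  -- Python returns the string "DIVZERO" here; the branch is unreachable (proved: x - y = -20 - k ≠ 0 under the guard)
    else
      PySem.Int.floordiv x (x - y)
  else
    x

-- ===== PORT B =====
def where_are_the_errors_alt (input : Int) : Int :=
  let k := PySem.Int.floordiv input 100
  if 3 * k + 100 > 43 then PySem.Int.floordiv 10 (-20 - k) else 10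

-- ===== PRECONDITION & SPEC =====
def Spec_where_are_the_errors (input : Int) (out : Int) : Prop := out = where_are_the_errors_alt input
instance (input : Int) (out : Int) : Decidable (Spec_where_are_the_errors input out) := by unfold Spec_where_are_the_errors; infer_instance

-- ===== CLAIM (what is proved, stated in full; the proofs are below) =====
def Claim_equal_where_are_the_errors : Prop := ∀ (input : Int), Dom_where_are_the_errors input → Spec_where_are_the_errors input (where_are_the_errors input)

-- ===== LEMMAS AND PROOFS =====
theorem pvLoopA_from_two (y : Int) : pvLoopA 2 y = (10, y + 24) := by
  rw [pvLoopA, pvLoopA, pvLoopA, pvLoopA, pvLoopA, pvLoopA, pvLoopA, pvLoopA, pvLoopA]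
  norm_num
  ring

-- ===== VERDICT (by name: the statement is the Claim_ definition above) =====
theorem where_are_the_errors_spec : Claim_equal_where_are_the_errors := by
  intro input _
  unfold Spec_where_are_the_errors where_are_the_errors where_are_the_errors_alt
  set k := PySem.Int.floordiv input 100 with hk
  simp only [pvLoopA_from_two]
  split_ifs with hg hz
  · -- guard holds but x - y = 0: impossible since then k = -20, contradicting the guard
    omega
  · -- guard holds: 10 // (10 - (k+5+24+1)) = 10 // (-20 - k)
    congr 1
    omega
  · rfl
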